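-- pv_equiv track=rewrite | github.com/ScottZt/jin-zao-rui-ka-aimes | api/mcp/production_reporting.py | _pick_process_name
-- ===== SOURCE A (Python) =====
-- from typing import Any, Dict, Optional
--
-- def _safe_text(value: Any) -> str:
--     if value is None:
--         return ""
--     return str(value).strip()
--
-- def _pick_process_name(work_order: Dict[str, Any]) -> str:
--     plans = work_order.get("processPlans")
--     if not isinstance(plans, list) or not plans:
--         return "\u8517\u83dc\u5207\u914d"
--
--     for wanted_status in ("active", "pending", "draft"):
--         for plan in plans:
--             if _safe_text(plan.get("status")) == wanted_status and _safe_text(plan.get("processName")):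
--                 return _safe_text(plan.get("processName"))
--     for plan in plans:
--         if _safe_text(plan.get("processName")):
--             return _safe_text(plan.get("processName"))
--     return "\u8517\u83dc\u5207\u914d"
-- ===== SOURCE B (Python) =====
-- from typing import Any, Dict
--
-- def _safe_text(value: Any) -> str:
--     if value is None:
--         return ""
--     return str(value).strip()
--
-- _RANK = {"active": 0, "pending": 1, "draft": 2}
--
-- def _pick_process_name(work_order: Dict[str, Any]) -> str:
--     plans = work_order.get("processPlans")
--     if not isinstance(plans, list) or not plans:
--         return "\u8517\u83dc\u5207\u914d"
--     best_rank = 4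
--     best_name = None
--     for plan in plans:
--         name = _safe_text(plan.get("processName"))
--         if not name:
--             continue
--         rank = _RANK.get(_safe_text(plan.get("status")), 3)
--         if rank < best_rank:
--             best_rank = rank
--             best_name = name
--     return best_name if best_name is not None else "\u8517\u83dc\u5207\u914d"
-- ===== Notes on version B (the rewrite author's own statement) =====
-- stated objective: simpler
-- what changed: Replaces A's four sequential scans of the plan list (one per priority status plus a fallback scan) with a single pass that keeps the best (lowest-rank, first-seen) named plan via a status-rank lookup.
import Mathlib
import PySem

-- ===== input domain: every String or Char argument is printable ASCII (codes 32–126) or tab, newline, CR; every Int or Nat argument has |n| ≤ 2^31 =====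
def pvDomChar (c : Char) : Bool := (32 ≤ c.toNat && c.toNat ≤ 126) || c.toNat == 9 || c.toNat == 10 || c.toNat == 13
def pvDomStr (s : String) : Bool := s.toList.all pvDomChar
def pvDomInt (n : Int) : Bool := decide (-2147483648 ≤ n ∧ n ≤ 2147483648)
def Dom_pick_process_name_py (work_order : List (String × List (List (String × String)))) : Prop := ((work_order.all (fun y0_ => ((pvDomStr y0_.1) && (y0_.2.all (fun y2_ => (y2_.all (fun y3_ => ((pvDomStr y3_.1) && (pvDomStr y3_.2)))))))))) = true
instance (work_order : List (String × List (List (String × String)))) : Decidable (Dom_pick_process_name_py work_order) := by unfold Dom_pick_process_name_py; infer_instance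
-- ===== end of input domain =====

-- B replaces A's four sequential scans of the plan list with one pass keeping the
-- lowest-rank, first-seen named plan (objective: simpler single-pass selection).

-- ===== PORT A =====
-- _safe_text on a dict lookup result (value is a String or missing/None)
def pvSafe (v : Option String) : String :=
  match v with
  | none => ""
  | some s => PySem.Str.strip s

-- inner 'for plan in plans: if status == wanted and name: return name'
def pvAScanStatus (wanted : String) : List (List (String × String)) → Option String
  | [] => none
  | plan :: rest =>
      if pvSafe (plan.lookup "status") = wanted ∧ pvSafe (plan.lookup "processName") ≠ "" then
        some (pvSafe (plan.lookup "processName"))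
      else pvAScanStatus wanted rest

-- outer 'for wanted_status in ("active","pending","draft")'
def pvAScanWanted (plans : List (List (String × String))) : List String → Option String
  | [] => none
  | w :: ws =>
      match pvAScanStatus w plans with
      | some n => some n
      | none => pvAScanWanted plans ws

-- fallback 'for plan in plans: if name: return name'
def pvAScanAny : List (List (String × String)) → Option String
  | [] => none
  | plan :: rest =>
      if pvSafe (plan.lookup "processName") ≠ "" then
        some (pvSafe (plan.lookup "processName"))
      else pvAScanAny rest

def pick_process_name_py (work_order : List (String × List (List (String × String)))) : String :=
  match work_order.lookup "processPlans" with
  | none => "蔗菜切配"   -- plans is None: not a list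
  | some plans =>
    if plans.isEmpty then "蔗菜切配"
    else
      match pvAScanWanted plans ["active", "pending", "draft"] with
      | some n => n
      | none =>
        match pvAScanAny plans with
        | some n => n
        | none => "蔗菜切配"

-- ===== PORT B =====
-- _RANK.get(status, 3)
def pvRank (s : String) : Nat :=
  if s = "active" then 0 else if s = "pending" then 1 else if s = "draft" then 2 else 3

def pvBStep (acc : Nat × Option String) (plan : List (String × String)) : Nat × Option String :=
  let name := pvSafe (plan.lookup "processName")
  if name = "" then acc
  else
    let r := pvRank (pvSafe (plan.lookup "status"))
    if r < acc.1 then (r, some name) else acc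

def pick_process_name_py_alt (work_order : List (String × List (List (String × String)))) : String :=
  match work_order.lookup "processPlans" with
  | none => "蔗菜切配"
  | some plans =>
    if plans.isEmpty then "蔗菜切配"
    else ((plans.foldl pvBStep (4, none)).2).getD "蔗菜切配"

-- ===== PRECONDITION & SPEC =====
def Spec_pick_process_name_py (work_order : List (String × List (List (String × String)))) (out : String) : Prop := out = pick_process_name_py_alt work_order
instance (work_order : List (String × List (List (String × String)))) (out : String) : Decidable (Spec_pick_process_name_py work_order out) := by unfold Spec_pick_process_name_py; infer_instance

-- ===== CLAIM (what is proved, stated in full; the proofs are below) =====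
def Claim_equal_pick_process_name_py : Prop := ∀ (work_order : List (String × List (List (String × String)))), Dom_pick_process_name_py work_order → Spec_pick_process_name_py work_order (pick_process_name_py work_order)

-- ===== LEMMAS AND PROOFS =====

-- proof-side abbreviations
def pvName (plan : List (String × String)) : String := pvSafe (plan.lookup "processName")
def pvRk (plan : List (String × String)) : Nat := pvRank (pvSafe (plan.lookup "status"))

-- first plan with a nonempty name at exactly rank r, in list order
def pvFirstAt (r : Nat) : List (List (String × String)) → Option String
  | [] => none
  | plan :: rest =>
      if pvName plan ≠ "" ∧ pvRk plan = r then some (pvName plan) else pvFirstAt r rest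

theorem pvRank_lt_four (s : String) : pvRank s < 4 := by
  unfold pvRank; split_ifs <;> omega

theorem pvRk_eq_zero (plan : List (String × String)) :
    pvRk plan = 0 ↔ pvSafe (plan.lookup "status") = "active" := by
  unfold pvRk pvRank; split_ifs <;> simp_all

theorem pvRk_eq_one (plan : List (String × String)) :
    pvRk plan = 1 ↔ pvSafe (plan.lookup "status") = "pending" := by
  unfold pvRk pvRank; split_ifs <;> simp_all

theorem pvRk_eq_two (plan : List (String × String)) :
    pvRk plan = 2 ↔ pvSafe (plan.lookup "status") = "draft" := by
  unfold pvRk pvRank; split_ifs <;> simp_all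

theorem pvAScanStatus_active (plans : List (List (String × String))) :
    pvAScanStatus "active" plans = pvFirstAt 0 plans := by
  induction plans with
  | nil => rfl
  | cons p rest ih =>
      simp only [pvAScanStatus, pvFirstAt, ih]
      have h := pvRk_eq_zero p
      by_cases hs : pvSafe (p.lookup "status") = "active" <;>
        by_cases hn : pvSafe (p.lookup "processName") = "" <;>
          simp_all [pvName]

theorem pvAScanStatus_pending (plans : List (List (String × String))) :
    pvAScanStatus "pending" plans = pvFirstAt 1 plans := by
  induction plans with
  | nil => rfl
  | cons p rest ih =>
      simp only [pvAScanStatus, pvFirstAt, ih]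
      have h := pvRk_eq_one p
      by_cases hs : pvSafe (p.lookup "status") = "pending" <;>
        by_cases hn : pvSafe (p.lookup "processName") = "" <;>
          simp_all [pvName]

theorem pvAScanStatus_draft (plans : List (List (String × String))) :
    pvAScanStatus "draft" plans = pvFirstAt 2 plans := by
  induction plans with
  | nil => rfl
  | cons p rest ih =>
      simp only [pvAScanStatus, pvFirstAt, ih]
      have h := pvRk_eq_two p
      by_cases hs : pvSafe (p.lookup "status") = "draft" <;>
        by_cases hn : pvSafe (p.lookup "processName") = "" <;>
          simp_all [pvName]

-- when no named plan has rank 0, 1 or 2, the fallback scan is exactly the rank-3 scan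
theorem pvAScanAny_eq_firstAt3 (plans : List (List (String × String)))
    (h0 : pvFirstAt 0 plans = none) (h1 : pvFirstAt 1 plans = none)
    (h2 : pvFirstAt 2 plans = none) :
    pvAScanAny plans = pvFirstAt 3 plans := by
  induction plans with
  | nil => rfl
  | cons p rest ih =>
      simp only [pvAScanAny, pvFirstAt] at *
      by_cases hn : pvName p = ""
      · simp_all [pvName]
      · have h4 := pvRank_lt_four (pvSafe (p.lookup "status"))
        have : pvRk p = 3 := by
          by_contra hne
          have : pvRk p = 0 ∨ pvRk p = 1 ∨ pvRk p = 2 := by unfold pvRk at *; omega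
          rcases this with h | h | h <;> simp_all
        simp_all [pvName]

-- characterisation of B's single-pass fold for an arbitrary accumulator
-- pvFirstAt on a cons cell, split by whether the head plan has a name
theorem pvFirstAt_cons_unnamed (r : Nat) (p : List (String × String))
    (rest : List (List (String × String))) (hn : pvName p = "") :
    pvFirstAt r (p :: rest) = pvFirstAt r rest := by
  simp [pvFirstAt, hn]

theorem pvFirstAt_cons_named (r : Nat) (p : List (String × String))
    (rest : List (List (String × String))) (hn : pvName p ≠ "") :
    pvFirstAt r (p :: rest) =
      if pvRk p = r then some (pvName p) else pvFirstAt r rest := by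
  simp [pvFirstAt, hn]

-- characterisation of B's single-pass fold for an arbitrary accumulator
theorem pvFold_char (plans : List (List (String × String))) :
    ∀ (r0 : Nat) (n0 : Option String),
    plans.foldl pvBStep (r0, n0) =
      if 0 < r0 ∧ (pvFirstAt 0 plans).isSome then (0, pvFirstAt 0 plans)
      else if 1 < r0 ∧ (pvFirstAt 1 plans).isSome then (1, pvFirstAt 1 plans)
      else if 2 < r0 ∧ (pvFirstAt 2 plans).isSome then (2, pvFirstAt 2 plans)
      else if 3 < r0 ∧ (pvFirstAt 3 plans).isSome then (3, pvFirstAt 3 plans)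
      else (r0, n0) := by
  induction plans with
  | nil => intro r0 n0; simp [pvFirstAt]
  | cons p rest ih =>
      intro r0 n0
      simp only [List.foldl_cons, pvBStep]
      by_cases hn : pvSafe (p.lookup "processName") = ""
      · rw [if_pos hn, ih r0 n0,
            pvFirstAt_cons_unnamed 0 p rest hn, pvFirstAt_cons_unnamed 1 p rest hn,
            pvFirstAt_cons_unnamed 2 p rest hn, pvFirstAt_cons_unnamed 3 p rest hn]
      · rw [if_neg hn]
        have hn' : pvName p ≠ "" := hn
        have h4 : pvRk p < 4 := pvRank_lt_four _
        rw [pvFirstAt_cons_named 0 p rest hn', pvFirstAt_cons_named 1 p rest hn',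
            pvFirstAt_cons_named 2 p rest hn', pvFirstAt_cons_named 3 p rest hn']
        by_cases hlt : pvRank (pvSafe (p.lookup "status")) < r0
        · rw [if_pos hlt, ih]
          replace hlt : pvRk p < r0 := hlt
          show _ = _
          simp only [show pvSafe (p.lookup "processName") = pvName p from rfl,
                     show pvRank (pvSafe (p.lookup "status")) = pvRk p from rfl]
          clear ih hn
          generalize pvName p = n at hn' ⊢
          generalize pvRk p = q at h4 hlt ⊢
          interval_cases q <;>
            · simp only [show ((0:Nat) = 0) = True by simp, show ((1:Nat) = 0) = False by simp,
                show ((2:Nat) = 0) = False by simp, show ((3:Nat) = 0) = False by simp,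
                show ((0:Nat) = 1) = False by simp, show ((1:Nat) = 1) = True by simp,
                show ((2:Nat) = 1) = False by simp, show ((3:Nat) = 1) = False by simp,
                show ((0:Nat) = 2) = False by simp, show ((1:Nat) = 2) = False by simp,
                show ((2:Nat) = 2) = True by simp, show ((3:Nat) = 2) = False by simp,
                show ((0:Nat) = 3) = False by simp, show ((1:Nat) = 3) = False by simp,
                show ((2:Nat) = 3) = False by simp, show ((3:Nat) = 3) = True by simp,
                if_true, if_false, Option.isSome_some]
              split_ifs <;> simp_all <;> omega
        · rw [if_neg hlt, ih r0 n0]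
          replace hlt : ¬ pvRk p < r0 := hlt
          clear ih hn
          generalize pvName p = n at hn' ⊢
          generalize pvRk p = q at h4 hlt ⊢
          interval_cases q <;>
            · simp only [show ((0:Nat) = 0) = True by simp, show ((1:Nat) = 0) = False by simp,
                show ((2:Nat) = 0) = False by simp, show ((3:Nat) = 0) = False by simp,
                show ((0:Nat) = 1) = False by simp, show ((1:Nat) = 1) = True by simp,
                show ((2:Nat) = 1) = False by simp, show ((3:Nat) = 1) = False by simp,
                show ((0:Nat) = 2) = False by simp, show ((1:Nat) = 2) = False by simp,
                show ((2:Nat) = 2) = True by simp, show ((3:Nat) = 2) = False by simp,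
                show ((0:Nat) = 3) = False by simp, show ((1:Nat) = 3) = False by simp,
                show ((2:Nat) = 3) = False by simp, show ((3:Nat) = 3) = True by simp,
                if_true, if_false, Option.isSome_some]
              split_ifs <;> simp_all <;> omega

-- evaluate B's fold result under each hasAt configuration, matching A's scan chain
theorem pvMain (plans : List (List (String × String))) :
    (match pvAScanWanted plans ["active", "pending", "draft"] with
      | some n => n
      | none =>
        match pvAScanAny plans with
        | some n => n
        | none => "蔗菜切配") =
    ((plans.foldl pvBStep (4, none)).2).getD "蔗菜切配" := by
  rw [pvFold_char]
  simp only [pvAScanWanted, pvAScanStatus_active, pvAScanStatus_pending, pvAScanStatus_draft]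
  cases h0 : pvFirstAt 0 plans with
  | some n => simp [h0]
  | none =>
    cases h1 : pvFirstAt 1 plans with
    | some n => simp [h1]
    | none =>
      cases h2 : pvFirstAt 2 plans with
      | some n => simp [h2]
      | none =>
        rw [pvAScanAny_eq_firstAt3 plans h0 h1 h2]
        cases h3 : pvFirstAt 3 plans <;> simp

-- ===== VERDICT (by name: the statement is the Claim_ definition above) =====
theorem pick_process_name_py_spec : Claim_equal_pick_process_name_py := by
  intro work_order _
  unfold Spec_pick_process_name_py pick_process_name_py pick_process_name_py_alt
  cases work_order.lookup "processPlans" with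
  | none => rfl
  | some plans =>
    by_cases he : plans.isEmpty <;> simp only [he, if_true]
    exact pvMain plans
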